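-- pv_equiv track=rewrite | github.com/PolLizaran/AP1 | Examens/Parcial2017/mes0o1.py | zeros_o_uns
-- ===== SOURCE A (Python) =====
-- def zeros_o_uns(n):
--     contador0 = 0
--     contador1 = 0
--     while n >= 1:
--         if n % 2 == 0:
--             contador0 += 1
--         else:
--             contador1 += 1
--         n //= 2
--     if contador1 > contador0:
--         return 1
--     elif contador0 > contador1:
--         return 0
--     else:
--         return 2
-- ===== SOURCE B (Python) =====
-- def zeros_o_uns(n):
--     if n < 1:
--         return 2
--     total = n.bit_length()
--     ones = n.bit_count()
--     d = 2 * ones - total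
--     return 1 if d > 0 else (0 if d < 0 else 2)
-- ===== Notes on version B (the rewrite author's own statement) =====
-- stated objective: idiomatic
-- what changed: Instead of A's division loop that maintains two separate counters and compares them, B never counts zero bits at all: it takes the popcount (int.bit_count) and the bit length (int.bit_length) and decides by the sign of twice the popcount minus the bit length, since zeros equal total minus ones.
import Mathlib
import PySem

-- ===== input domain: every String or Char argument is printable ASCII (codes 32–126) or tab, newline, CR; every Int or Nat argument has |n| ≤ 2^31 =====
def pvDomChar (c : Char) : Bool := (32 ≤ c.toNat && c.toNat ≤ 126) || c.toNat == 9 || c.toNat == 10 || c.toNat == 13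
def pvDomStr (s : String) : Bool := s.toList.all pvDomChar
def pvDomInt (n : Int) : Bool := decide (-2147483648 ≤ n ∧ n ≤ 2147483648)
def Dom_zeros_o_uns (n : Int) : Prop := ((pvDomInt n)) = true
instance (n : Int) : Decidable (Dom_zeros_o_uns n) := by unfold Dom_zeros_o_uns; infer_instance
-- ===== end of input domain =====

-- B drops A's two-counter division loop entirely: it reads the popcount and the bit length
-- (the bit_count/bit_length builtins) and decides by the sign of 2*ones - total_bits;
-- idiomatic, return value only.

-- ===== PORT A =====
-- while n >= 1: count n % 2 == 0 into contador0 else contador1; n //= 2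
def zoLoop (n c0 c1 : Int) : Int × Int :=
  if h : 1 ≤ n then
    if PySem.Int.mod n 2 = 0 then
      zoLoop (PySem.Int.floordiv n 2) (c0 + 1) c1
    else
      zoLoop (PySem.Int.floordiv n 2) c0 (c1 + 1)
  else (c0, c1)
termination_by n.toNat
decreasing_by
  all_goals
    rw [PySem.Int.floordiv_eq_ediv_of_pos (by norm_num : (0:Int) < 2)]
    omega

def zeros_o_uns (n : Int) : Int :=
  let p := zoLoop n 0 0
  if p.2 > p.1 then 1
  else if p.1 > p.2 then 0
  else 2

-- ===== PORT B =====
-- total = n.bit_length(); ones = n.bit_count(); sign of 2*ones - total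
def zeros_o_uns_alt (n : Int) : Int :=
  if n < 1 then 2
  else
    let total : Int := PySem.Int.bitLength n
    let ones : Int := PySem.Int.bitCount n
    let d := 2 * ones - total
    if d > 0 then 1
    else if d < 0 then 0
    else 2

-- ===== PRECONDITION & SPEC =====
def Spec_zeros_o_uns (n : Int) (out : Int) : Prop := out = zeros_o_uns_alt n
instance (n : Int) (out : Int) : Decidable (Spec_zeros_o_uns n out) := by unfold Spec_zeros_o_uns; infer_instance

-- ===== CLAIM (what is proved, stated in full; the proofs are below) =====
def Claim_equal_zeros_o_uns : Prop := ∀ (n : Int), Dom_zeros_o_uns n → Spec_zeros_o_uns n (zeros_o_uns n)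

-- ===== LEMMAS AND PROOFS =====

-- A's loop accumulates exactly (bit_length - popcount, popcount) for nonnegative n.
theorem zoLoop_eq (n c0 c1 : Int) (hn : 0 ≤ n) :
    zoLoop n c0 c1 =
      (c0 + ((PySem.Int.bitLength n : Int) - (PySem.Int.bitCount n : Int)),
       c1 + (PySem.Int.bitCount n : Int)) := by
  by_cases h : 1 ≤ n
  · have hpos : (0:Int) < n := by omega
    have hq : (0:Int) ≤ PySem.Int.floordiv n 2 := by
      rw [PySem.Int.floordiv_eq_ediv_of_pos (by norm_num : (0:Int) < 2)]
      omega
    have ih := fun c0 c1 => zoLoop_eq (PySem.Int.floordiv n 2) c0 c1 hq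
    rw [zoLoop, dif_pos h, PySem.Int.bitLength_of_pos hpos, PySem.Int.bitCount_of_pos hpos]
    by_cases hm : PySem.Int.mod n 2 = 0
    · rw [if_pos hm, ih, hm]
      simp only [Int.toNat_zero, Nat.zero_add]
      push_cast
      rw [Prod.mk.injEq]
      constructor <;> ring
    · have hm1 : PySem.Int.mod n 2 = 1 := by
        rw [PySem.Int.mod_eq_emod_of_pos (by norm_num : (0:Int) < 2)] at hm ⊢
        omega
      rw [if_neg hm, ih, hm1]
      simp only [Int.toNat_one]
      push_cast
      rw [Prod.mk.injEq]
      constructor <;> ring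
  · have h0 : n = 0 := by omega
    rw [zoLoop, dif_neg h, h0]
    simp [PySem.Int.bitLength_zero, PySem.Int.bitCount_zero]
termination_by n.toNat
decreasing_by
  rw [PySem.Int.floordiv_eq_ediv_of_pos (by norm_num : (0:Int) < 2)]
  omega

-- ===== VERDICT (by name: the statement is the Claim_ definition above) =====
theorem zeros_o_uns_spec : Claim_equal_zeros_o_uns := by
  intro n _
  unfold Spec_zeros_o_uns zeros_o_uns zeros_o_uns_alt
  by_cases h : n < 1
  · rw [zoLoop, dif_neg (by omega), if_pos h]
    norm_num
  · rw [zoLoop_eq n 0 0 (by omega), if_neg h]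
    set t := (PySem.Int.bitLength n : Int)
    set o := (PySem.Int.bitCount n : Int)
    simp only [zero_add]
    split_ifs <;> omega
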